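-- pv_equiv track=rewrite | github.com/romulopro/thinkInPython | Cap13/Exercise13-7.py | choose_from_hist
-- ===== SOURCE A (Python) =====
-- def choose_from_hist(list_of_hist):
--     hist_dict = {}
--     for item in list_of_hist:
--         if item not in hist_dict:
--             hist_dict[item] = 1
--         else:
--             hist_dict[item] += 1
--     probly_dict = {}
--     total_items = len(list_of_hist)
--     for key, value in hist_dict.items():
--         probly_dict[key] = str(value) + "/" + str(total_items)
--     return(probly_dict)
-- ===== SOURCE B (Python) =====
-- def _prob_pairs(xs, total):
--     if not xs:
--         return []
--     x = xs[0]
--     rest = [y for y in xs if y != x]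
--     return [(x, str(len(xs) - len(rest)) + "/" + str(total))] + _prob_pairs(rest, total)
--
--
-- def choose_from_hist(list_of_hist):
--     return dict(_prob_pairs(list_of_hist, len(list_of_hist)))
-- ===== Notes on version B (the rewrite author's own statement) =====
-- stated objective: alternative
-- what changed: Replaces A's single-pass dict-accumulation histogram with a remove-and-recurse partition: take the first value, filter out all its occurrences (count = length drop), recurse on the remainder, and build the dict once from the resulting (value, 'count/total') pairs.
import Mathlib
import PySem

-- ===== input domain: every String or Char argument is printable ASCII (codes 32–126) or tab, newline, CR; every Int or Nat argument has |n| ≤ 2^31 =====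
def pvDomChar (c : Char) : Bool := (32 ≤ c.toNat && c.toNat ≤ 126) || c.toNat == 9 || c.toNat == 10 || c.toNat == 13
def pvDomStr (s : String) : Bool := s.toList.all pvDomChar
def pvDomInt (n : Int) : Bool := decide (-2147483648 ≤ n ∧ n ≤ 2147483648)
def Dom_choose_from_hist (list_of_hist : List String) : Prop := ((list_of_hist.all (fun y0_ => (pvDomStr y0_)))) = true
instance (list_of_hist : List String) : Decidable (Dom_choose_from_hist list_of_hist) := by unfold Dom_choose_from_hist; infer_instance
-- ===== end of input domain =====

-- B replaces A's dict-accumulation histogram by a remove-and-recurse partition over the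
-- distinct values (count = length drop after filtering), building the dict once at the end
-- (alternative decomposition; same return value).

-- ===== PORT A =====
def choose_from_hist (list_of_hist : List String) : List (String × String) :=
  let hist_dict : PySem.Dict String Int :=
    list_of_hist.foldl (fun d item =>
      if ¬ d.contains item then d.insert item 1
      else d.insert item (d.getD item 0 + 1)) PySem.Dict.empty
  let total_items : Int := list_of_hist.length
  let probly_dict : PySem.Dict String String :=
    hist_dict.items.foldl (fun d kv =>
      d.insert kv.1 (PySem.Int.toStr kv.2 ++ "/" ++ PySem.Int.toStr total_items))
      PySem.Dict.empty
  probly_dict.items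

-- ===== PORT B =====
def prob_pairs : List String → Int → List (String × String)
  | [], _ => []
  | x :: t, total =>
    let rest := (x :: t).filter (fun y => !(y == x))
    (x, PySem.Int.toStr (((x :: t).length : Int) - (rest.length : Int)) ++ "/" ++
        PySem.Int.toStr total) :: prob_pairs rest total
termination_by xs _ => xs.length
decreasing_by
  simp only [List.filter_cons, beq_self_eq_true, Bool.not_true, List.length_cons]
  exact Nat.lt_succ_of_le (List.length_filter_le _ _)

def choose_from_hist_alt (list_of_hist : List String) : List (String × String) :=
  (PySem.Dict.ofList (prob_pairs list_of_hist (list_of_hist.length : Int))).items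

-- ===== PRECONDITION & SPEC =====
def Spec_choose_from_hist (list_of_hist : List String) (out : List (String × String)) : Prop := out = choose_from_hist_alt list_of_hist
instance (list_of_hist : List String) (out : List (String × String)) : Decidable (Spec_choose_from_hist list_of_hist out) := by unfold Spec_choose_from_hist; infer_instance

-- ===== CLAIM =====
def Claim_equal_choose_from_hist : Prop := ∀ (list_of_hist : List String), Dom_choose_from_hist list_of_hist → Spec_choose_from_hist list_of_hist (choose_from_hist list_of_hist)

-- ===== LEMMAS AND PROOFS =====

-- A's first loop is exactly Counter(list_of_hist)
lemma hist_eq_counter (xs : List String) :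
    xs.foldl (fun d item =>
      if ¬ d.contains item then d.insert item 1
      else d.insert item (d.getD item 0 + 1)) (PySem.Dict.empty : PySem.Dict String Int)
    = PySem.Dict.counter xs := by
  rw [← PySem.Dict.foldl_insert_getD_add_one_eq_counter]
  apply PySem.List.foldl_congr_mem
  intro d x _
  by_cases h : d.contains x = true
  · simp [h]
  · simp [h, PySem.Dict.getD_of_not_contains]

lemma foldl_add_cons {α : Type} [BEq α] [LawfulBEq α] (xs : List α) :
    ∀ (p : List α) (x : α),
    xs.foldl PySem.Set.add (x :: p)
      = x :: (xs.filter (fun y => !(y == x))).foldl PySem.Set.add p := by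
  induction xs with
  | nil => intro p x; rfl
  | cons y ys ih =>
    intro p x
    by_cases h : y = x
    · subst h
      have hy : PySem.Set.add (y :: p) y = y :: p :=
        PySem.Set.add_of_mem (List.mem_cons_self ..)
      rw [List.foldl_cons, hy, List.filter_cons_of_neg (by simp)]
      exact ih p y
    · have hb : (!(y == x)) = true := by simp [h]
      have hadd : PySem.Set.add (x :: p) y = x :: PySem.Set.add p y := by
        by_cases hm : y ∈ p
        · rw [PySem.Set.add_of_mem (List.mem_cons_of_mem _ hm), PySem.Set.add_of_mem hm]
        · rw [PySem.Set.add_of_not_mem (by simp [h, hm] : y ∉ x :: p),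
              PySem.Set.add_of_not_mem hm]
          rfl
      have hf : List.filter (fun y => !(y == x)) (y :: ys)
          = y :: List.filter (fun y => !(y == x)) ys := by
        simp [List.filter_cons, hb]
      rw [List.foldl_cons, hadd, hf, List.foldl_cons]
      exact ih (PySem.Set.add p y) x

lemma ofList_cons_filter {α : Type} [BEq α] [LawfulBEq α] (x : α) (t : List α) :
    PySem.Set.ofList (x :: t) = x :: PySem.Set.ofList (t.filter (fun y => !(y == x))) := by
  have he : PySem.Set.add PySem.Set.empty x = [x] := by
    simp [PySem.Set.add, PySem.Set.empty]
  rw [PySem.Set.ofList, List.foldl_cons, he]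
  exact foldl_add_cons t [] x

lemma count_add_filter_length (x : String) (l : List String) :
    l.count x + (l.filter (fun y => !(y == x))).length = l.length := by
  induction l with
  | nil => rfl
  | cons y t ih =>
    by_cases h : y = x
    · subst h
      simp [List.count_cons, List.filter_cons]
      omega
    · have hb : (y == x) = false := by simp [h]
      simp [List.count_cons, List.filter_cons, hb]
      omega

lemma head_count (x : String) (t : List String) :
    (((x :: t).length : Int) - ((((x :: t).filter (fun y => !(y == x))).length : Int)))
      = (((x :: t).count x : Int)) := by
  have h := count_add_filter_length x (x :: t)
  omega

lemma prob_pairs_eq (n : Nat) : ∀ (xs : List String) (total : Int), xs.length ≤ n →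
    prob_pairs xs total
      = (PySem.Set.ofList xs).map
          (fun k => (k, PySem.Int.toStr ((xs.count k : Int)) ++ "/" ++ PySem.Int.toStr total)) := by
  induction n with
  | zero =>
    intro xs total h
    have : xs = [] := List.eq_nil_of_length_eq_zero (Nat.le_zero.mp h)
    subst this
    simp [prob_pairs, PySem.Set.ofList]
  | succ n ih =>
    intro xs total h
    cases xs with
    | nil => simp [prob_pairs, PySem.Set.ofList]
    | cons x t =>
      rw [prob_pairs]
      have hrest : ((x :: t).filter (fun y => !(y == x))) = t.filter (fun y => !(y == x)) := by
        simp [List.filter_cons]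
      have hlen : (t.filter (fun y => !(y == x))).length ≤ n := by
        have := List.length_filter_le (fun y => !(y == x)) t
        simp only [List.length_cons] at h
        omega
      rw [ofList_cons_filter, List.map_cons]
      simp only [hrest]
      rw [ih _ total hlen]
      congr 1
      · rw [← hrest, head_count]
      · apply List.map_congr_left
        intro k hk
        have hk' : k ∈ t.filter (fun y => !(y == x)) := (PySem.Set.mem_ofList _ _).mp hk
        have hkx : (k == x) = false := by
          have := List.of_mem_filter hk'
          simpa using this
        have hcf : (t.filter (fun y => !(y == x))).count k = t.count k :=
          List.count_filter (by simp [hkx])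
        have hcc : (x :: t).count k = t.count k := by
          rw [List.count_cons]
          simp [show (x == k) = false by
            cases h' : (x == k) <;> simp_all [BEq.comm]]
        rw [hcf, hcc]

lemma nodup_fst_map {α : Type} (g : String → α) (s : List String) (hs : s.Nodup) :
    ((List.map (fun k => (k, g k)) s).map Prod.fst).Nodup := by
  rw [List.map_map]
  have h : (Prod.fst ∘ fun k => (k, g k)) = fun k => k := rfl
  rw [h]
  simpa using hs

lemma items_ofList_fresh (pairs : List (String × String))
    (hnd : (pairs.map Prod.fst).Nodup) :
    (PySem.Dict.ofList pairs).items = pairs := by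
  have := PySem.Dict.items_foldl_insert_fresh pairs Prod.fst Prod.snd PySem.Dict.empty
    (by intro a _; simp [PySem.Dict.contains_empty]) hnd
  simpa [PySem.Dict.ofList, PySem.Dict.update] using this

-- ===== VERDICT =====
theorem choose_from_hist_spec : Claim_equal_choose_from_hist := by
  intro xs _
  unfold Spec_choose_from_hist choose_from_hist choose_from_hist_alt
  dsimp only
  rw [hist_eq_counter, PySem.Dict.items_counter, List.foldl_map,
      prob_pairs_eq xs.length xs (xs.length : Int) le_rfl,
      items_ofList_fresh _ (nodup_fst_map _ _ (PySem.Set.nodup_ofList xs))]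
  have hA := PySem.Dict.items_foldl_insert_fresh (PySem.Set.ofList xs) (fun y : String => y)
      (fun y => PySem.Int.toStr ((xs.count y : Int)) ++ "/" ++ PySem.Int.toStr (xs.length : Int))
      PySem.Dict.empty (by intro a _; simp [PySem.Dict.contains_empty])
      (by simpa using PySem.Set.nodup_ofList xs)
  simpa [PySem.Dict.empty, PySem.Dict.items] using hA
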